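-- pv_equiv track=rewrite | github.com/z3y50n/advent_of_code | 2020/17/day17.py | copy_list_4d
-- ===== SOURCE A (Python) =====
-- def copy_list_4d(a):
--     new = []
--     for h in range(len(a)):
--         hyper = []
--         for i in range(len(a[h])):
--             level = []
--             for j in range(len(a[h][i])):
--                 row = []
--                 for k in range(len(a[h][i][j])):
--                     row.append(a[h][i][j][k])
--                 level.append(row)
--             hyper.append(level)
--         new.append(hyper)
--     return new
-- ===== SOURCE B (Python) =====
-- def copy_list_4d(a):
--     def cp(x, depth):
--         if depth == 0:
--             return x
--         return [cp(e, depth - 1) for e in x]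
--     return cp(a, 4)
-- ===== Notes on version B (the rewrite author's own statement) =====
-- stated objective: simpler
-- what changed: Replaces four explicit index loops with append by a single recursive helper cp(x, depth) that maps itself over each nesting level and returns the element unchanged at depth 0.
import Mathlib
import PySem

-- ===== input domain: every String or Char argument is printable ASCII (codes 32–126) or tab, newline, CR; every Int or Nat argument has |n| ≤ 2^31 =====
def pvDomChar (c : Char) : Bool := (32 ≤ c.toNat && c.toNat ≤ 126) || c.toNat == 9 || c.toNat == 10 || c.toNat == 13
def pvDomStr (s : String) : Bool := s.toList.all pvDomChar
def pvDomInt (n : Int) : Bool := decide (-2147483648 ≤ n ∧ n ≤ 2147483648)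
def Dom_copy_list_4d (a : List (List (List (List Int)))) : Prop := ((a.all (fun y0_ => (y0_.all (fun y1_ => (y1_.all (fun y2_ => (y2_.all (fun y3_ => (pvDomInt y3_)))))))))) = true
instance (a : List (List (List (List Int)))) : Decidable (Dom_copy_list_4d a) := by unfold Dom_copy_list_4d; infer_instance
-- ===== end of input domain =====

-- B replaces A's four explicit index loops by one recursive helper, mapped level by
-- level over the nesting (objective: simpler); return values are identical.

-- ===== PORT A =====
-- Four nested index loops over range(len(·)), each appending to an accumulator.
def copy_list_4d (a : List (List (List (List Int)))) : List (List (List (List Int))) :=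
  (PySem.List.pyRange 0 a.length 1).foldl (fun new h =>
    new ++ [(PySem.List.pyRange 0 (PySem.List.pyGetD a h []).length 1).foldl (fun hyper i =>
      hyper ++ [(PySem.List.pyRange 0 (PySem.List.pyGetD (PySem.List.pyGetD a h []) i []).length 1).foldl (fun level j =>
        level ++ [(PySem.List.pyRange 0 (PySem.List.pyGetD (PySem.List.pyGetD (PySem.List.pyGetD a h []) i []) j []).length 1).foldl (fun row k =>
          row ++ [PySem.List.pyGetD (PySem.List.pyGetD (PySem.List.pyGetD (PySem.List.pyGetD a h []) i []) j []) k 0]) []]) []]) []]) []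

-- ===== PORT B =====
-- B's cp(x, depth) recursion instantiated at each of its four depths
-- (Lean's types force one helper per nesting level; each is 'map' of the next, depth 0 is the leaf).
def cp0 (x : Int) : Int := x
def cp1 (x : List Int) : List Int := x.map cp0
def cp2 (x : List (List Int)) : List (List Int) := x.map cp1
def cp3 (x : List (List (List Int))) : List (List (List Int)) := x.map cp2
def copy_list_4d_alt (a : List (List (List (List Int)))) : List (List (List (List Int))) :=
  a.map cp3

-- ===== PRECONDITION & SPEC =====
def Spec_copy_list_4d (a : List (List (List (List Int)))) (out : List (List (List (List Int)))) : Prop := out = copy_list_4d_alt a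
instance (a : List (List (List (List Int)))) (out : List (List (List (List Int)))) : Decidable (Spec_copy_list_4d a out) := by unfold Spec_copy_list_4d; infer_instance

-- ===== CLAIM (what is proved, stated in full; the proofs are below) =====
def Claim_equal_copy_list_4d : Prop := ∀ (a : List (List (List (List Int)))), Dom_copy_list_4d a → Spec_copy_list_4d a (copy_list_4d a)

-- ===== LEMMAS AND PROOFS =====

-- an append-to-accumulator loop is 'map' shifted onto the front of the accumulator
theorem foldl_append_singleton {α β : Type} (g : α → β) (xs : List α) (init : List β) :
    xs.foldl (fun acc x => acc ++ [g x]) init = init ++ xs.map g := by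
  induction xs generalizing init with
  | nil => simp
  | cons x xs ih => simp [List.foldl_cons, ih, List.append_assoc]

-- A's innermost loop copies a row elementwise
theorem copyA_row (r : List Int) :
    (PySem.List.pyRange 0 r.length 1).foldl (fun row k => row ++ [PySem.List.pyGetD r k 0]) [] = r := by
  rw [PySem.List.foldl_pyRange_zero_pyGetD' r 0 (fun acc x => acc ++ [x]) []]
  simpa using foldl_append_singleton (fun x : Int => x) r []

-- A's j-loop copies a level
theorem copyA_level (l : List (List Int)) :
    (PySem.List.pyRange 0 l.length 1).foldl (fun level j =>
      level ++ [(PySem.List.pyRange 0 (PySem.List.pyGetD l j []).length 1).foldl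
        (fun row k => row ++ [PySem.List.pyGetD (PySem.List.pyGetD l j []) k 0]) []]) [] = l := by
  rw [PySem.List.foldl_pyRange_zero_pyGetD' l [] (fun acc r =>
    acc ++ [(PySem.List.pyRange 0 r.length 1).foldl (fun row k => row ++ [PySem.List.pyGetD r k 0]) []]) []]
  rw [foldl_append_singleton]
  simp only [List.nil_append, copyA_row, List.map_id']

-- A's i-loop copies a hyperplane
theorem copyA_hyper (hp : List (List (List Int))) :
    (PySem.List.pyRange 0 hp.length 1).foldl (fun hyper i =>
      hyper ++ [(PySem.List.pyRange 0 (PySem.List.pyGetD hp i []).length 1).foldl (fun level j =>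
        level ++ [(PySem.List.pyRange 0 (PySem.List.pyGetD (PySem.List.pyGetD hp i []) j []).length 1).foldl
          (fun row k => row ++ [PySem.List.pyGetD (PySem.List.pyGetD (PySem.List.pyGetD hp i []) j []) k 0]) []]) []]) [] = hp := by
  rw [PySem.List.foldl_pyRange_zero_pyGetD' hp [] (fun acc l =>
    acc ++ [(PySem.List.pyRange 0 l.length 1).foldl (fun level j =>
      level ++ [(PySem.List.pyRange 0 (PySem.List.pyGetD l j []).length 1).foldl
        (fun row k => row ++ [PySem.List.pyGetD (PySem.List.pyGetD l j []) k 0]) []]) []]) []]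
  rw [foldl_append_singleton]
  simp only [List.nil_append, copyA_level, List.map_id']

theorem copy_list_4d_eq_id (a : List (List (List (List Int)))) : copy_list_4d a = a := by
  unfold copy_list_4d
  rw [PySem.List.foldl_pyRange_zero_pyGetD' a [] (fun acc hp =>
    acc ++ [(PySem.List.pyRange 0 hp.length 1).foldl (fun hyper i =>
      hyper ++ [(PySem.List.pyRange 0 (PySem.List.pyGetD hp i []).length 1).foldl (fun level j =>
        level ++ [(PySem.List.pyRange 0 (PySem.List.pyGetD (PySem.List.pyGetD hp i []) j []).length 1).foldl
          (fun row k => row ++ [PySem.List.pyGetD (PySem.List.pyGetD (PySem.List.pyGetD hp i []) j []) k 0]) []]) []]) []]) []]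
  rw [foldl_append_singleton]
  simp only [List.nil_append, copyA_hyper, List.map_id']

theorem cp1_id : cp1 = id := funext fun x => List.map_id' x
theorem cp2_id : cp2 = id := funext fun x => by show x.map cp1 = x; rw [cp1_id, List.map_id]
theorem cp3_id : cp3 = id := funext fun x => by show x.map cp2 = x; rw [cp2_id, List.map_id]

theorem copy_list_4d_alt_eq_id (a : List (List (List (List Int)))) : copy_list_4d_alt a = a := by
  show a.map cp3 = a; rw [cp3_id, List.map_id]

-- ===== VERDICT (by name: the statement is the Claim_ definition above) =====
theorem copy_list_4d_spec : Claim_equal_copy_list_4d := by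
  intro a _
  unfold Spec_copy_list_4d
  rw [copy_list_4d_eq_id, copy_list_4d_alt_eq_id]
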